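-- pv_equiv track=rewrite | github.com/Webs4Dev/resumelens | backend/pdf_loader.py | add_section_breaks
-- ===== SOURCE A (Python) =====
-- def add_section_breaks(text):
--     headers = [
--         "education",
--         "additional courses",
--         "projects",
--         "technical skills",
--         "soft skills"
--     ]
--     for h in headers:
--         text = text.replace(h, f"\n{h}\n")
--     return text
-- ===== SOURCE B (Python) =====
-- def add_section_breaks(text):
--     headers = [
--         "education",
--         "additional courses",
--         "projects",
--         "technical skills",
--         "soft skills"
--     ]
--     out = []
--     i = 0
--     n = len(text)
--     while i < n:
--         for h in headers:
--             if text.startswith(h, i):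
--                 out.append("\n" + h + "\n")
--                 i += len(h)
--                 break
--         else:
--             out.append(text[i])
--             i += 1
--     return "".join(out)
-- ===== Notes on version B (the rewrite author's own statement) =====
-- stated objective: alternative
-- what changed: Replaces five sequential full-text str.replace passes (each rebuilding the whole string) by a single left-to-right scan that at each position tries the header table in order, emits a wrapped header or the current character, and joins once at the end.
import Mathlib
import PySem

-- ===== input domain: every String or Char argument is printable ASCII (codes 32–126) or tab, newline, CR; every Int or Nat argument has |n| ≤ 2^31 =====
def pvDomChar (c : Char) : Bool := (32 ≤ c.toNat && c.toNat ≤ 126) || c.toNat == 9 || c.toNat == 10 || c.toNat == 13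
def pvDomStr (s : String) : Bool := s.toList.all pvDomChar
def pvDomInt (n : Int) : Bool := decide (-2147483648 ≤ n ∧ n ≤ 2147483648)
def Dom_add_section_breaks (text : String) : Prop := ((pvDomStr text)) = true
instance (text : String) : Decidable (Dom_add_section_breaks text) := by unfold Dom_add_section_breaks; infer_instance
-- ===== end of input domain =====

-- B replaces A's five sequential full-text str.replace passes by a single left-to-right
-- scan over the text that tries the header table in order at each position (alternative
-- decomposition; same results, proved equal below).


-- ===== PORT A =====
-- literal transliteration of A: for h in headers: text = text.replace(h, "\n"+h+"\n")
def add_section_breaks (text : String) : String :=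
  (["education", "additional courses", "projects", "technical skills", "soft skills"]).foldl
    (fun t h => PySem.Str.replace t h ("\n" ++ h ++ "\n")) text

-- ===== PORT B =====
-- B's header table, as char lists (the scan works position by position on characters)
def sbHeaders : List (List Char) :=
  ["education".toList, "additional courses".toList, "projects".toList,
   "technical skills".toList, "soft skills".toList]

-- B's single left-to-right scan: at each position try the headers in order
-- (`find?` = B's inner `for h in headers … break`); on a match emit "\n"+h+"\n" and skip
-- len(h) characters, otherwise emit the character and move on.
def sbScan (hs : List (List Char)) : List Char → List Char
  | [] => []
  | c :: t =>
    match hs.find? (fun h => h.isPrefixOf (c :: t)) with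
    | some h => '\n' :: (h ++ '\n' :: sbScan hs (t.drop (h.length - 1)))
    | none => c :: sbScan hs t
termination_by l => l.length
decreasing_by
  · simp only [List.length_drop, List.length_cons]
    omega
  · simp

def add_section_breaks_alt (text : String) : String :=
  String.ofList (sbScan sbHeaders text.toList)

-- ===== PRECONDITION & SPEC =====
def Spec_add_section_breaks (text : String) (out : String) : Prop := out = add_section_breaks_alt text
instance (text : String) (out : String) : Decidable (Spec_add_section_breaks text out) := by unfold Spec_add_section_breaks; infer_instance

-- ===== CLAIM (what is proved, stated in full; the proofs are below) =====
def Claim_equal_add_section_breaks : Prop := ∀ (text : String), Dom_add_section_breaks text → Spec_add_section_breaks text (add_section_breaks text)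

-- ===== LEMMAS AND PROOFS =====

-- Structural form of Python's str.replace (left-to-right, non-overlapping) for a
-- nonempty pattern; proved equal to PySem.Chars.replace below.
def pvRepl (old nu : List Char) : List Char → List Char
  | [] => []
  | c :: t =>
    if old.isPrefixOf (c :: t) then nu ++ pvRepl old nu (t.drop (old.length - 1))
    else c :: pvRepl old nu t
termination_by l => l.length
decreasing_by
  · simp only [List.length_drop, List.length_cons]
    omega
  · simp

lemma pvRepl_nil (old nu : List Char) : pvRepl old nu [] = [] := by
  simp [pvRepl]

lemma pvRepl_pos {old : List Char} (nu : List Char) {c : Char} {t : List Char}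
    (h : old.isPrefixOf (c :: t)) :
    pvRepl old nu (c :: t) = nu ++ pvRepl old nu (t.drop (old.length - 1)) := by
  rw [pvRepl, if_pos h]

lemma pvRepl_neg {old : List Char} (nu : List Char) {c : Char} {t : List Char}
    (h : ¬ old.isPrefixOf (c :: t)) :
    pvRepl old nu (c :: t) = c :: pvRepl old nu t := by
  rw [pvRepl, if_neg h]

lemma replace_go_eq (old nu : List Char) (hold : old ≠ []) :
    ∀ (fuel : ℕ) (l acc : List Char), l.length ≤ fuel →
      PySem.Chars.replace.go old nu fuel l acc = acc.reverse ++ pvRepl old nu l := by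
  intro fuel
  induction fuel with
  | zero =>
    intro l acc hl
    have hl0 : l = [] := List.eq_nil_of_length_eq_zero (Nat.le_zero.mp hl)
    subst hl0
    simp [PySem.Chars.replace.go, pvRepl_nil]
  | succ n ih =>
    intro l acc hl
    cases l with
    | nil =>
      simp [PySem.Chars.replace.go, pvRepl_nil]
    | cons c t =>
      rw [PySem.Chars.replace.go]
      by_cases hp : old.isPrefixOf (c :: t)
      · rw [if_pos hp, pvRepl_pos nu hp]
        have hdrop : List.drop old.length (c :: t) = t.drop (old.length - 1) := by
          cases old with
          | nil => exact absurd rfl hold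
          | cons o os => simp
        have hlen : (t.drop (old.length - 1)).length ≤ n := by
          simp only [List.length_drop]
          simp only [List.length_cons] at hl
          have : 1 ≤ old.length := List.length_pos_iff.mpr hold
          omega
        rw [hdrop, ih (t.drop (old.length - 1)) (nu.reverse ++ acc) hlen]
        simp
      · rw [if_neg hp, pvRepl_neg nu hp]
        have hlen : t.length ≤ n := by
          simp only [List.length_cons] at hl; omega
        rw [ih t (c :: acc) hlen]
        simp

lemma chars_replace_eq {old : List Char} (nu : List Char) (hold : old ≠ []) (s : List Char) :
    PySem.Chars.replace s old nu = pvRepl old nu s := by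
  rw [PySem.Chars.replace, if_neg (by simpa [List.isEmpty_iff] using hold)]
  rw [replace_go_eq old nu hold s.length s [] le_rfl]
  simp

lemma sbScan_nil (hs : List (List Char)) : sbScan hs [] = [] := by
  simp [sbScan]

lemma sbScan_cons (hs : List (List Char)) (c : Char) (t : List Char) :
    sbScan hs (c :: t) =
      match hs.find? (fun h => h.isPrefixOf (c :: t)) with
      | some h => '\n' :: (h ++ '\n' :: sbScan hs (t.drop (h.length - 1)))
      | none => c :: sbScan hs t := by
  rw [sbScan]

-- D': a '\n'-free prefix of the replaced string is a prefix of the original, the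
-- remainder factors, and no pattern occurrence starts inside it.
lemma prefix_repl {old nu w : List Char} (hnl : '\n' ∉ w) :
    ∀ u : List Char, w <+: pvRepl old ('\n' :: nu) u →
      w <+: u ∧ (pvRepl old ('\n' :: nu) u).drop w.length = pvRepl old ('\n' :: nu) (u.drop w.length)
        ∧ ∀ i < w.length, ¬ old <+: u.drop i := by
  induction w with
  | nil =>
    intro u _
    exact ⟨List.nil_prefix, by simp, fun i hi => by simp at hi⟩
  | cons d w ih =>
    have hdn : d ≠ '\n' := fun hh => hnl (hh ▸ List.mem_cons_self)
    have hwn : '\n' ∉ w := fun hh => hnl (List.mem_cons_of_mem _ hh)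
    intro u hw
    cases u with
    | nil =>
      rw [pvRepl_nil] at hw
      exact absurd (List.prefix_nil.mp hw) (by simp)
    | cons c v =>
      by_cases hp : old.isPrefixOf (c :: v)
      · rw [pvRepl_pos _ hp, List.cons_append, List.cons_prefix_cons] at hw
        exact absurd hw.1 hdn
      · rw [pvRepl_neg _ hp, List.cons_prefix_cons] at hw
        obtain ⟨rfl, hw'⟩ := hw
        obtain ⟨h1, h2, h3⟩ := ih hwn v hw'
        refine ⟨List.cons_prefix_cons.mpr ⟨rfl, h1⟩, ?_, ?_⟩
        · rw [pvRepl_neg _ hp]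
          simpa using h2
        · intro i hi
          cases i with
          | zero =>
            simpa [List.isPrefixOf_iff_prefix] using hp
          | succ j =>
            intro hc
            exact h3 j (by simpa using hi) (by simpa using hc)

-- U: a prefix not overlapping any pattern occurrence survives replacement.
lemma prefix_repl_of {old nu w : List Char} :
    ∀ u : List Char, w <+: u → (∀ i < w.length, ¬ old <+: u.drop i) →
      w <+: pvRepl old nu u := by
  induction w with
  | nil => intro u _ _; exact List.nil_prefix
  | cons d w ih =>
    intro u hw hno
    cases u with
    | nil => exact absurd (List.prefix_nil.mp hw) (by simp)
    | cons c v =>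
      rw [List.cons_prefix_cons] at hw
      have h0 : ¬ old <+: (c :: v) := by simpa using hno 0 (by simp)
      rw [pvRepl_neg nu (fun hh => h0 (List.isPrefixOf_iff_prefix.mp hh))]
      refine List.cons_prefix_cons.mpr ⟨hw.1, ih v hw.2 ?_⟩
      intro i hi
      simpa using hno (i + 1) (by simpa using hi)

lemma find?_congr_mem {α : Type} (l : List α) (p q : α → Bool) (h : ∀ a ∈ l, p a = q a) :
    l.find? p = l.find? q := by
  induction l with
  | nil => rfl
  | cons a l ih =>
    have ha := h a List.mem_cons_self
    by_cases hp : p a = true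
    · rw [List.find?_cons_of_pos hp, List.find?_cons_of_pos (ha ▸ hp)]
    · rw [List.find?_cons_of_neg hp, List.find?_cons_of_neg (fun hq => hp (ha ▸ hq))]
      exact ih fun a ha' => h a (List.mem_cons_of_mem _ ha')

-- pairwise side condition between an earlier header h and a later header hd
abbrev SideCond (h hd : List Char) : Prop :=
  hd ≠ [] ∧ '\n' ∉ hd ∧ ¬ hd <:+: h ∧
    ∀ k, k < hd.length → 0 < k → ¬ (hd.drop k <+: h) ∧ ¬ (h <+: hd.drop k)

lemma no_occ_of_compat {h : List Char} {d : Char} {w t' : List Char}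
    (hcompat : ∀ k, k < (d :: w).length → 0 < k →
      ¬ ((d :: w).drop k <+: h) ∧ ¬ (h <+: (d :: w).drop k))
    (hwt : w <+: t') : ∀ i < w.length, ¬ h <+: t'.drop i := by
  intro i hi hcontra
  have h1 : w.drop i <+: t'.drop i := hwt.drop i
  have hk : i + 1 < (d :: w).length := by simp only [List.length_cons]; omega
  rcases List.prefix_or_prefix_of_prefix h1 hcontra with hc | hc
  · exact (hcompat (i + 1) hk (Nat.succ_pos i)).1 (by simpa using hc)
  · exact (hcompat (i + 1) hk (Nat.succ_pos i)).2 (by simpa using hc)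

lemma sbScan_append (hs : List (List Char)) (ys : List Char) :
    ∀ xs : List Char, (∀ j < xs.length, ∀ hd ∈ hs, ¬ hd <+: (xs.drop j ++ ys)) →
      sbScan hs (xs ++ ys) = xs ++ sbScan hs ys := by
  intro xs
  induction xs with
  | nil => intro _; simp
  | cons x xr ih =>
    intro hno
    rw [List.cons_append, sbScan_cons]
    have hnone : (hs.find? fun h => h.isPrefixOf (x :: (xr ++ ys))) = none := by
      rw [List.find?_eq_none]
      intro hd hmem hpre
      exact hno 0 (by simp) hd hmem (by simpa [List.isPrefixOf_iff_prefix] using hpre)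
    rw [hnone]
    show x :: sbScan hs (xr ++ ys) = (x :: xr) ++ sbScan hs ys
    rw [ih fun j hj hd hmem => by simpa using hno (j + 1) (by simpa using hj) hd hmem]
    rfl

lemma block_no_match {h hd : List Char} (hne : hd ≠ []) (hnl : '\n' ∉ hd)
    (hinf : ¬ hd <:+: h) {j : ℕ} (hj : j < ('\n' :: (h ++ ['\n'])).length) (ys : List Char) :
    ¬ hd <+: (('\n' :: (h ++ ['\n'])).drop j ++ ys) := by
  intro hpre
  cases j with
  | zero =>
    cases hd with
    | nil => exact hne rfl
    | cons d w =>
      rw [List.drop_zero, List.cons_append, List.cons_prefix_cons] at hpre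
      obtain ⟨rfl, -⟩ := hpre
      exact hnl List.mem_cons_self
  | succ k =>
    have hk : k ≤ h.length := by
      simp only [List.length_cons, List.length_append, List.length_nil] at hj
      omega
    rw [List.drop_succ_cons, List.drop_append_of_le_length hk, List.append_assoc,
      List.singleton_append] at hpre
    by_cases hlen : hd.length ≤ h.length - k
    · have h2 : hd = (h.drop k).take hd.length := by
        conv_lhs => rw [List.prefix_iff_eq_take.mp hpre]
        rw [List.take_append_of_le_length (by simp only [List.length_drop]; omega)]
      have hpre' : hd <+: h.drop k := by rw [h2]; exact List.take_prefix _ _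
      exact hinf (hpre'.isInfix.trans (List.drop_suffix k h).isInfix)
    · have hm : h.length - k < hd.length := by omega
      have hval : hd[h.length - k]'hm = '\n' := by
        rw [hpre.getElem hm]
        rw [List.getElem_append_right (by simp only [List.length_drop]; omega)]
        simp
      exact hnl (hval ▸ List.getElem_mem hm)

lemma bridge (h : List Char) (hs : List (List Char)) (hne : h ≠ [])
    (hside : ∀ hd ∈ hs, SideCond h hd) :
    ∀ t : List Char, sbScan hs (pvRepl h ('\n' :: (h ++ ['\n'])) t) = sbScan (h :: hs) t := by
  have key : ∀ n : ℕ, ∀ t : List Char, t.length ≤ n →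
      sbScan hs (pvRepl h ('\n' :: (h ++ ['\n'])) t) = sbScan (h :: hs) t := by
    intro n
    induction n with
    | zero =>
      intro t ht
      have ht0 : t = [] := List.eq_nil_of_length_eq_zero (Nat.le_zero.mp ht)
      subst ht0
      rw [pvRepl_nil, sbScan_nil, sbScan_nil]
    | succ n ih =>
      intro t ht
      cases t with
      | nil => rw [pvRepl_nil, sbScan_nil, sbScan_nil]
      | cons c t' =>
        have hh1 : 1 ≤ h.length := List.length_pos_iff.mpr hne
        by_cases hp : h.isPrefixOf (c :: t')
        · rw [pvRepl_pos _ hp]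
          rw [sbScan_append hs _ ('\n' :: (h ++ ['\n'])) (by
            intro j hj hd hmem hpre
            obtain ⟨hdne, hdnl, hdinf, -⟩ := hside hd hmem
            exact block_no_match hdne hdnl hdinf hj _ hpre)]
          have hlen : (t'.drop (h.length - 1)).length ≤ n := by
            simp only [List.length_drop]
            simp only [List.length_cons] at ht
            omega
          rw [ih _ hlen, sbScan_cons,
            List.find?_cons_of_pos (p := fun hd => hd.isPrefixOf (c :: t')) (a := h) (l := hs) hp]
          simp
        · rw [pvRepl_neg _ hp]
          rw [sbScan_cons hs c (pvRepl h ('\n' :: (h ++ ['\n'])) t'),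
            sbScan_cons (h :: hs) c t',
            List.find?_cons_of_neg (p := fun hd => hd.isPrefixOf (c :: t')) (a := h) (l := hs) hp]
          have hfind : (hs.find? fun hd => hd.isPrefixOf (c :: pvRepl h ('\n' :: (h ++ ['\n'])) t'))
              = hs.find? fun hd => hd.isPrefixOf (c :: t') := by
            apply find?_congr_mem
            intro hd hmem
            obtain ⟨hdne, hdnl, -, hcompat⟩ := hside hd hmem
            cases hd with
            | nil => exact absurd rfl hdne
            | cons d w =>
              have hwn : '\n' ∉ w := fun hh => hdnl (List.mem_cons_of_mem _ hh)
              rw [Bool.eq_iff_iff]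
              simp only [List.isPrefixOf_iff_prefix, List.cons_prefix_cons]
              constructor
              · rintro ⟨rfl, hw⟩
                exact ⟨rfl, (prefix_repl hwn t' hw).1⟩
              · rintro ⟨rfl, hw⟩
                exact ⟨rfl, prefix_repl_of t' hw (no_occ_of_compat hcompat hw)⟩
          rw [hfind]
          cases hf : hs.find? fun hd => hd.isPrefixOf (c :: t') with
          | none =>
            show c :: sbScan hs (pvRepl h ('\n' :: (h ++ ['\n'])) t') = c :: sbScan (h :: hs) t'
            have hlen : t'.length ≤ n := by simp only [List.length_cons] at ht; omega
            rw [ih t' hlen]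
          | some hd =>
            obtain ⟨hdne, hdnl, -, hcompat⟩ := hside hd (List.mem_of_find?_eq_some hf)
            have hdp := List.isPrefixOf_iff_prefix.mp
              (List.find?_some (p := fun hd : List Char => hd.isPrefixOf (c :: t')) hf)
            cases hd with
            | nil => exact absurd rfl hdne
            | cons d w =>
              have hwn : '\n' ∉ w := fun hh => hdnl (List.mem_cons_of_mem _ hh)
              rw [List.cons_prefix_cons] at hdp
              obtain ⟨rfl, hw⟩ := hdp
              have hno := no_occ_of_compat hcompat hw
              have hwrepl : w <+: pvRepl h ('\n' :: (h ++ ['\n'])) t' :=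
                prefix_repl_of t' hw hno
              have hdropeq := (prefix_repl hwn t' hwrepl).2.1
              show '\n' :: ((d :: w) ++ '\n' ::
                  sbScan hs ((pvRepl h ('\n' :: (h ++ ['\n'])) t').drop ((d :: w).length - 1)))
                = '\n' :: ((d :: w) ++ '\n' :: sbScan (h :: hs) (t'.drop ((d :: w).length - 1)))
              have hlen : (t'.drop ((d :: w).length - 1)).length ≤ n := by
                simp only [List.length_drop]
                simp only [List.length_cons] at ht ⊢
                omega
              simp only [List.length_cons, Nat.add_sub_cancel]
              rw [hdropeq, ih _ (by simpa using hlen)]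
  intro t
  exact key t.length t le_rfl

lemma sbScan_nil_headers : ∀ l : List Char, sbScan [] l = l := by
  intro l
  induction l with
  | nil => exact sbScan_nil []
  | cons c t ih => rw [sbScan_cons]; simp [ih]

-- the five replace passes, chained through `bridge`, equal the single scan
lemma main_chars (l : List Char) :
    sbScan sbHeaders l =
      pvRepl "soft skills".toList ('\n' :: ("soft skills".toList ++ ['\n']))
        (pvRepl "technical skills".toList ('\n' :: ("technical skills".toList ++ ['\n']))
          (pvRepl "projects".toList ('\n' :: ("projects".toList ++ ['\n']))
            (pvRepl "additional courses".toList ('\n' :: ("additional courses".toList ++ ['\n']))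
              (pvRepl "education".toList ('\n' :: ("education".toList ++ ['\n'])) l)))) := by
  have b1 := bridge "education".toList
    ["additional courses".toList, "projects".toList, "technical skills".toList, "soft skills".toList]
    (by decide) (by decide)
  have b2 := bridge "additional courses".toList
    ["projects".toList, "technical skills".toList, "soft skills".toList] (by decide) (by decide)
  have b3 := bridge "projects".toList
    ["technical skills".toList, "soft skills".toList] (by decide) (by decide)
  have b4 := bridge "technical skills".toList ["soft skills".toList] (by decide) (by decide)
  have b5 := bridge "soft skills".toList [] (by decide) (by decide)
  calc sbScan sbHeaders l
      = sbScan ["additional courses".toList, "projects".toList, "technical skills".toList,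
          "soft skills".toList]
          (pvRepl "education".toList ('\n' :: ("education".toList ++ ['\n'])) l) := (b1 l).symm
    _ = sbScan ["projects".toList, "technical skills".toList, "soft skills".toList] _ := (b2 _).symm
    _ = sbScan ["technical skills".toList, "soft skills".toList] _ := (b3 _).symm
    _ = sbScan ["soft skills".toList] _ := (b4 _).symm
    _ = sbScan [] _ := (b5 _).symm
    _ = _ := sbScan_nil_headers _

-- ===== VERDICT (by name: the statement is the Claim_ definition above) =====
theorem add_section_breaks_spec : Claim_equal_add_section_breaks := by
  unfold Claim_equal_add_section_breaks
  intro text _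
  unfold Spec_add_section_breaks add_section_breaks add_section_breaks_alt
  simp only [List.foldl_cons, List.foldl_nil]
  set L := PySem.Str.replace (PySem.Str.replace (PySem.Str.replace (PySem.Str.replace
    (PySem.Str.replace text "education" ("\n" ++ "education" ++ "\n"))
    "additional courses" ("\n" ++ "additional courses" ++ "\n"))
    "projects" ("\n" ++ "projects" ++ "\n"))
    "technical skills" ("\n" ++ "technical skills" ++ "\n"))
    "soft skills" ("\n" ++ "soft skills" ++ "\n") with hL
  have hlist : L.toList = sbScan sbHeaders text.toList := by
    rw [hL]
    simp only [PySem.Str.toList_replace]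
    rw [chars_replace_eq _ (by decide), chars_replace_eq _ (by decide),
      chars_replace_eq _ (by decide), chars_replace_eq _ (by decide),
      chars_replace_eq _ (by decide)]
    rw [show ("\n" ++ "education" ++ "\n").toList = '\n' :: ("education".toList ++ ['\n']) by decide,
      show ("\n" ++ "additional courses" ++ "\n").toList
        = '\n' :: ("additional courses".toList ++ ['\n']) by decide,
      show ("\n" ++ "projects" ++ "\n").toList = '\n' :: ("projects".toList ++ ['\n']) by decide,
      show ("\n" ++ "technical skills" ++ "\n").toList
        = '\n' :: ("technical skills".toList ++ ['\n']) by decide,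
      show ("\n" ++ "soft skills" ++ "\n").toList = '\n' :: ("soft skills".toList ++ ['\n']) by decide]
    exact (main_chars text.toList).symm
  calc L = String.ofList L.toList := (String.ofList_toList (s := L)).symm
    _ = String.ofList (sbScan sbHeaders text.toList) := by rw [hlist]
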